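-- pv_equiv track=rewrite | github.com/Latias94/fret | tools/prepare_release_plz_checkout_overrides.py | strip_managed_block
-- ===== SOURCE A (Python) =====
-- MANAGED_BEGIN = "# fret-release-plz checkout overrides: begin"
--
-- MANAGED_END = "# fret-release-plz checkout overrides: end"
--
-- def strip_managed_block(text: str) -> str:
--     lines = text.splitlines()
--     cleaned: list[str] = []
--     inside_block = False
--
--     for line in lines:
--         if line == MANAGED_BEGIN:
--             inside_block = True
--             continue
--         if line == MANAGED_END:
--             inside_block = False
--             continue
--         if not inside_block:
--             cleaned.append(line)
--
--     if inside_block: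
--         raise SystemExit("unterminated managed release-plz override block")
--
--     return "\n".join(cleaned).strip("\n")
-- ===== SOURCE B (Python) =====
-- MANAGED_BEGIN = "# fret-release-plz checkout overrides: begin"
--
-- MANAGED_END = "# fret-release-plz checkout overrides: end"
--
-- def strip_managed_block(text: str) -> str:
--     cleaned: list[str] = []
--     it = iter(text.splitlines())
--     for line in it:
--         if line == MANAGED_BEGIN:
--             for inner in it:
--                 if inner == MANAGED_END:
--                     break
--             else:
--                 raise SystemExit("unterminated managed release-plz override block")
--         elif line == MANAGED_END:
--             continue
--         else:
--             cleaned.append(line)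
--     return "\n".join(cleaned).strip("\n")
-- ===== Notes on version B (the rewrite author's own statement) =====
-- stated objective: alternative
-- what changed: Replaces the boolean inside_block flag filter with an explicit-iterator pass whose nested consume-until-END loop (with for/else for the unterminated case) eats each managed block.
-- outside the precondition, e.g. on strip_managed_block('# fret-release-plz checkout overrides: begin'): A raises SystemExit, B raises SystemExit
import Mathlib
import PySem

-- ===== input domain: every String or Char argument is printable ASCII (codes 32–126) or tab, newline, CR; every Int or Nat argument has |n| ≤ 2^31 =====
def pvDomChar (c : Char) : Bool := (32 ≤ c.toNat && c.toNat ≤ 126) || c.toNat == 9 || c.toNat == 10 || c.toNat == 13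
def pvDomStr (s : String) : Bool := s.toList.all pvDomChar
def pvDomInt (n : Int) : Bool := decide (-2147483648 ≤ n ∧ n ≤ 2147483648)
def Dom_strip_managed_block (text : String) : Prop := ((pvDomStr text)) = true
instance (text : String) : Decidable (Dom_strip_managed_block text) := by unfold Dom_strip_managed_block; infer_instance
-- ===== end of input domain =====

-- B replaces A's boolean-flag filter with a nested consume-until-END loop over an explicit iterator (alternative decomposition, same cost); return value only, no mutation.

-- ===== PORT A =====
def pvMB : String := "# fret-release-plz checkout overrides: begin"
def pvME : String := "# fret-release-plz checkout overrides: end"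

-- the for-loop of A: state (cleaned, inside_block)
def stripA_loop : List String → List String → Bool → List String × Bool
  | [], cleaned, inside => (cleaned, inside)
  | l :: t, cleaned, inside =>
    if l = pvMB then stripA_loop t cleaned true
    else if l = pvME then stripA_loop t cleaned false
    else if !inside then stripA_loop t (cleaned ++ [l]) inside
    else stripA_loop t cleaned inside

def strip_managed_block (text : String) : String :=
  let r := stripA_loop (PySem.Str.splitlines text) [] false
  if r.2 then ""  -- Python raises SystemExit here; excluded by Pre_
  else PySem.Str.stripChars (PySem.Str.join "\n" r.1) "\n"

-- ===== PORT B =====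
-- the outer `for line in it` loop; none = the inner for/else raised SystemExit
mutual
def stripB_outer : List String → Option (List String)
  | [] => some []
  | l :: t =>
    if l = pvMB then stripB_skip t
    else if l = pvME then stripB_outer t
    else (stripB_outer t).map (l :: ·)

-- the nested `for inner in it` loop consuming until MANAGED_END
def stripB_skip : List String → Option (List String)
  | [] => none
  | l :: t => if l = pvME then stripB_outer t else stripB_skip t
end

def strip_managed_block_alt (text : String) : String :=
  match stripB_outer (PySem.Str.splitlines text) with
  | some cleaned => PySem.Str.stripChars (PySem.Str.join "\n" cleaned) "\n"
  | none => ""  -- Python raises SystemExit here; excluded by Pre_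

-- ===== PRECONDITION & SPEC =====
-- Pre_ excludes exactly the inputs with an unterminated managed block (a BEGIN line after the
-- last END line), on which both Pythons raise SystemExit.
def Pre_strip_managed_block (text : String) : Prop :=
  pvMB ∉ (PySem.Str.splitlines text).reverse.takeWhile (fun l => !(l == pvME))
instance (text : String) : Decidable (Pre_strip_managed_block text) := by
  unfold Pre_strip_managed_block; infer_instance

def pvWitness_strip_managed_block : String :=
  "a\n# fret-release-plz checkout overrides: begin\nx\n# fret-release-plz checkout overrides: end\nb"

def Spec_strip_managed_block (text : String) (out : String) : Prop := out = strip_managed_block_alt text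
instance (text : String) (out : String) : Decidable (Spec_strip_managed_block text out) := by unfold Spec_strip_managed_block; infer_instance

-- ===== CLAIM (what is proved, stated in full; the proofs are below) =====
def Claim_equal_strip_managed_block : Prop := ∀ (text : String), Dom_strip_managed_block text → Pre_strip_managed_block text → Spec_strip_managed_block text (strip_managed_block text)

-- ===== LEMMAS AND PROOFS =====

theorem pvNe : pvMB ≠ pvME := by decide
theorem pvNe' : pvME ≠ pvMB := by decide

-- the terminated-block condition on a list of lines
def pvCond (t : List String) : Prop := pvMB ∉ t.reverse.takeWhile (fun l => !(l == pvME))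

theorem mem_takeWhile_append {α : Type} (p : α → Bool) (x : α) (xs ys : List α)
    (h : x ∈ xs.takeWhile p) : x ∈ (xs ++ ys).takeWhile p := by
  induction xs with
  | nil => simp [List.takeWhile] at h
  | cons a t ih =>
    simp only [List.cons_append, List.takeWhile] at h ⊢
    cases hp : p a with
    | true =>
      simp [hp] at h ⊢
      rcases h with h | h
      · exact Or.inl h
      · exact Or.inr (ih h)
    | false => simp [hp] at h

theorem pvCond_tail (l : String) (t : List String) (h : pvCond (l :: t)) : pvCond t := by
  unfold pvCond at h ⊢
  intro hm
  exact h (by simpa using mem_takeWhile_append _ pvMB t.reverse [l] hm)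

theorem takeWhile_all {α : Type} (p : α → Bool) (xs : List α) (h : ∀ x ∈ xs, p x = true) :
    xs.takeWhile p = xs := by
  induction xs with
  | nil => rfl
  | cons a t ih =>
    simp only [List.takeWhile, h a (by simp)]
    simp [ih (fun x hx => h x (by simp [hx]))]

theorem pvCond_begin (t : List String) (h : pvCond (pvMB :: t)) : pvME ∈ t := by
  by_contra hne
  apply h
  unfold pvCond at *
  have hall : ∀ x ∈ t.reverse ++ [pvMB], (fun l => !(l == pvME)) x = true := by
    intro x hx
    simp only [List.mem_append, List.mem_reverse, List.mem_singleton] at hx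
    rcases hx with hx | hx
    · simp; intro he; exact hne (he ▸ hx)
    · simp [hx]; decide
  simp only [List.reverse_cons]
  rw [takeWhile_all _ _ hall]
  simp

theorem pvMain : ∀ n (t : List String), t.length ≤ n →
    (pvCond t → ∀ acc, ∃ r, stripB_outer t = some r ∧ stripA_loop t acc false = (acc ++ r, false)) ∧
    (pvME ∈ t → pvCond t → ∀ acc, ∃ r, stripB_skip t = some r ∧ stripA_loop t acc true = (acc ++ r, false)) := by
  intro n
  induction n with
  | zero =>
    intro t ht
    have : t = [] := List.length_eq_zero_iff.mp (Nat.le_zero.mp ht)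
    subst this
    refine ⟨fun _ acc => ⟨[], rfl, by simp [stripA_loop]⟩, fun hm => by simp at hm⟩
  | succ n ih =>
    intro t ht
    cases t with
    | nil => refine ⟨fun _ acc => ⟨[], rfl, by simp [stripA_loop]⟩, fun hm => by simp at hm⟩
    | cons l t =>
      have ht' : t.length ≤ n := by simpa using Nat.le_of_succ_le_succ ht
      constructor
      · intro hc acc
        have hct := pvCond_tail l t hc
        by_cases hb : l = pvMB
        · subst hb
          have hme : pvME ∈ t := pvCond_begin t hc
          obtain ⟨r, h1, h2⟩ := (ih t ht').2 hme hct acc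
          exact ⟨r, by simp [stripB_outer, h1], by simp [stripA_loop, h2]⟩
        · by_cases he : l = pvME
          · subst he
            obtain ⟨r, h1, h2⟩ := (ih t ht').1 hct acc
            refine ⟨r, by simp [stripB_outer, pvNe', h1], by simp [stripA_loop, pvNe', h2]⟩
          · obtain ⟨r, h1, h2⟩ := (ih t ht').1 hct (acc ++ [l])
            refine ⟨l :: r, by simp [stripB_outer, hb, he, h1], ?_⟩
            simp [stripA_loop, hb, he, h2]
      · intro hme hc acc
        have hct := pvCond_tail l t hc
        by_cases he : l = pvME
        · subst he
          obtain ⟨r, h1, h2⟩ := (ih t ht').1 hct acc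
          exact ⟨r, by simp [stripB_skip, h1], by simp [stripA_loop, pvNe', h2]⟩
        · have hme' : pvME ∈ t := by
            rcases List.mem_cons.mp hme with h | h
            · exact absurd h.symm he
            · exact h
          obtain ⟨r, h1, h2⟩ := (ih t ht').2 hme' hct acc
          by_cases hb : l = pvMB
          · subst hb
            exact ⟨r, by simp [stripB_skip, pvNe, h1], by simp [stripA_loop, h2]⟩
          · exact ⟨r, by simp [stripB_skip, he, h1], by simp [stripA_loop, hb, he, h2]⟩

-- ===== VERDICT (by name: the statement is the Claim_ definition above) =====
theorem strip_managed_block_spec : Claim_equal_strip_managed_block := by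
  intro text _dom hpre
  unfold Spec_strip_managed_block strip_managed_block strip_managed_block_alt
  obtain ⟨r, h1, h2⟩ :=
    (pvMain (PySem.Str.splitlines text).length (PySem.Str.splitlines text) le_rfl).1 hpre []
  simp [h1, h2]
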